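-- pv_equiv track=rewrite | github.com/AniketKumar15/PythonCodes | Some Others/RSA.py | numberToMessage
-- ===== SOURCE A (Python) =====
-- def numberToMessage(numbers):
--     reverse_map = {
--         63: " ",
--         64: ".",
--         65: ",",
--         66: "!",
--         67: "?"
--     }
--     message = ""
--     for num in numbers:
--         if 1 <= num <= 26:  # A-Z
--             message += chr(num + ord('A') - 1)
--         elif 27 <= num <= 52:  # a-z
--             message += chr(num - 27 + ord('a'))
--         elif 53 <= num <= 62:  # 0-9
--             message += chr(num - 53 + ord('0'))
--         elif num in reverse_map:
--             message += reverse_map[num]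
--         else:
--             message += "?"
--     return message
-- ===== SOURCE B (Python) =====
-- def numberToMessage(numbers):
--     chars = "ABCDEFGHIJKLMNOPQRSTUVWXYZabcdefghijklmnopqrstuvwxyz0123456789 .,!?"
--     table = {i + 1: ch for i, ch in enumerate(chars)}
--     return ''.join(table.get(num, '?') for num in numbers)
-- ===== Notes on version B (the rewrite author's own statement) =====
-- stated objective: idiomatic
-- what changed: Replaced the four-way range-arithmetic branch chain appended in a loop with a precomputed code->char lookup table built from one alphabet string via enumerate, then a single ''.join over dict.get with '?' default.
import Mathlib
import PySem

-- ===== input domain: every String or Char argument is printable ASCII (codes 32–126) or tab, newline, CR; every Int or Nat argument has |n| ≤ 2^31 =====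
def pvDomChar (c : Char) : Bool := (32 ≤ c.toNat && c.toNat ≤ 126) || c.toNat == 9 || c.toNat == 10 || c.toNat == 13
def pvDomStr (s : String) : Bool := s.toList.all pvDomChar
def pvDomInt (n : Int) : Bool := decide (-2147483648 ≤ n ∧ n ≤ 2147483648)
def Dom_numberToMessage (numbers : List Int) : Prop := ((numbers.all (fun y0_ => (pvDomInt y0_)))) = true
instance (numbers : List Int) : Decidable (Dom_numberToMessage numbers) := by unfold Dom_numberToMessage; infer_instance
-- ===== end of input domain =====

-- B replaces A's four-way range-arithmetic branch chain with a code->char table built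
-- from one alphabet string, then a single join over table lookups (idiomatic, same cost).

set_option maxRecDepth 8192


-- ===== PORT A =====
def numberToMessage (numbers : List Int) : String :=
  let reverse_map : PySem.Dict Int String :=
    PySem.Dict.ofList [(63, " "), (64, "."), (65, ","), (66, "!"), (67, "?")]
  numbers.foldl (fun message num =>
    if 1 ≤ num ∧ num ≤ 26 then          -- A-Z
      message ++ String.singleton (Char.ofNat (num + 65 - 1).toNat)
    else if 27 ≤ num ∧ num ≤ 52 then    -- a-z
      message ++ String.singleton (Char.ofNat (num - 27 + 97).toNat)
    else if 53 ≤ num ∧ num ≤ 62 then    -- 0-9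
      message ++ String.singleton (Char.ofNat (num - 53 + 48).toNat)
    else if reverse_map.contains num then
      message ++ reverse_map.getD num "?"  -- guarded lookup: key is present
    else
      message ++ "?") ""

-- ===== PORT B =====
def pvChars : String := "ABCDEFGHIJKLMNOPQRSTUVWXYZabcdefghijklmnopqrstuvwxyz0123456789 .,!?"

def pvTable : PySem.Dict Int String :=
  PySem.Dict.ofList ((PySem.List.enumerate pvChars.toList 0).map
    (fun p => (p.1 + 1, String.singleton p.2)))

def numberToMessage_alt (numbers : List Int) : String :=
  PySem.Str.join "" (numbers.map (fun num => pvTable.getD num "?"))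

-- ===== PRECONDITION & SPEC =====
def Spec_numberToMessage (numbers : List Int) (out : String) : Prop := out = numberToMessage_alt numbers
instance (numbers : List Int) (out : String) : Decidable (Spec_numberToMessage numbers out) := by unfold Spec_numberToMessage; infer_instance

-- ===== CLAIM (what is proved, stated in full; the proofs are below) =====
def Claim_equal_numberToMessage : Prop := ∀ (numbers : List Int), Dom_numberToMessage numbers → Spec_numberToMessage numbers (numberToMessage numbers)

-- ===== LEMMAS AND PROOFS =====

-- The per-element string A's loop body appends (proof-side helper mirroring A's branch chain).
def pvAChar (num : Int) : String :=
  if 1 ≤ num ∧ num ≤ 26 then String.singleton (Char.ofNat (num + 65 - 1).toNat)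
  else if 27 ≤ num ∧ num ≤ 52 then String.singleton (Char.ofNat (num - 27 + 97).toNat)
  else if 53 ≤ num ∧ num ≤ 62 then String.singleton (Char.ofNat (num - 53 + 48).toNat)
  else if (PySem.Dict.ofList [((63:Int), " "), (64, "."), (65, ","), (66, "!"), (67, "?")]).contains num then
    (PySem.Dict.ofList [((63:Int), " "), (64, "."), (65, ","), (66, "!"), (67, "?")]).getD num "?"
  else "?"

lemma pvRmap_keys_bounded : ∀ p ∈ (PySem.Dict.ofList [((63:Int), " "), (64, "."), (65, ","), (66, "!"), (67, "?")]).items, 63 ≤ p.1 ∧ p.1 ≤ 67 := by decide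

lemma pvIntersperse_nil_flatten {α : Type} (l : List (List α)) :
    (List.intersperse [] l).flatten = l.flatten := by
  induction l with
  | nil => rfl
  | cons x xs ih =>
    cases xs with
    | nil => rfl
    | cons y ys => simpa using ih

lemma pvTable_keys_bounded : ∀ p ∈ pvTable.items, 1 ≤ p.1 ∧ p.1 ≤ 67 := by decide

lemma pvTable_getD_out (num : Int) (h : num < 1 ∨ 67 < num) :
    pvTable.getD num "?" = "?" := by
  have hc : pvTable.contains num = false := by
    simp only [PySem.Dict.contains, List.any_eq_false]
    intro p hp
    have := pvTable_keys_bounded p hp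
    simp only [beq_iff_eq]
    omega
  have hn : pvTable.get? num = none :=
    (PySem.Dict.get?_eq_none_iff_contains pvTable num).mpr hc
  simp [PySem.Dict.getD, hn]

lemma pvAChar_eq_table (num : Int) : pvAChar num = pvTable.getD num "?" := by
  by_cases h : 1 ≤ num ∧ num ≤ 67
  · obtain ⟨h1, h2⟩ := h
    interval_cases num <;> decide
  · have hb : num < 1 ∨ 67 < num := by omega
    rw [pvTable_getD_out num hb]
    have hc : (PySem.Dict.ofList [((63:Int), " "), (64, "."), (65, ","), (66, "!"), (67, "?")]).contains num = false := by
      simp only [PySem.Dict.contains, List.any_eq_false]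
      intro p hp
      have h67 := pvRmap_keys_bounded p hp
      simp only [beq_iff_eq]
      omega
    unfold pvAChar
    simp only [hc]
    split_ifs with g1 g2 g3 g4 <;>
      first | rfl | exact absurd (by omega) h | simp at g4

lemma pvFoldl_eq (l : List Int) (acc : String) :
    (l.foldl (fun message num => message ++ pvAChar num) acc).toList
      = acc.toList ++ (l.map (fun num => (pvAChar num).toList)).flatten := by
  induction l generalizing acc with
  | nil => simp
  | cons x xs ih => simp [List.foldl_cons, ih, String.toList_append]

lemma pvStep_eq (message : String) (num : Int) :
    (if 1 ≤ num ∧ num ≤ 26 then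
      message ++ String.singleton (Char.ofNat (num + 65 - 1).toNat)
    else if 27 ≤ num ∧ num ≤ 52 then
      message ++ String.singleton (Char.ofNat (num - 27 + 97).toNat)
    else if 53 ≤ num ∧ num ≤ 62 then
      message ++ String.singleton (Char.ofNat (num - 53 + 48).toNat)
    else if (PySem.Dict.ofList [((63:Int), " "), (64, "."), (65, ","), (66, "!"), (67, "?")]).contains num then
      message ++ (PySem.Dict.ofList [((63:Int), " "), (64, "."), (65, ","), (66, "!"), (67, "?")]).getD num "?"
    else
      message ++ "?") = message ++ pvAChar num := by
  unfold pvAChar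
  split_ifs <;> rfl

-- ===== VERDICT (by name: the statement is the Claim_ definition above) =====
theorem numberToMessage_spec : Claim_equal_numberToMessage := by
  intro numbers _
  unfold Spec_numberToMessage numberToMessage numberToMessage_alt
  apply String.toList_inj.mp
  simp only [pvStep_eq]
  rw [pvFoldl_eq]
  simp only [PySem.Str.join, String.toList_ofList, PySem.Chars.join, List.intercalate,
    show "".toList = ([] : List Char) from rfl]
  rw [pvIntersperse_nil_flatten]
  simp [pvAChar_eq_table, Function.comp_def]
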